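-- pv_equiv track=rewrite | github.com/eratem/advent_of_code_2023 | day1.py | naive_decomposition
-- ===== SOURCE A (Python) =====
-- def naive_decomposition(line: str) -> int:
--     digits = ["0", "1", "2", "3", "4", "5", "6", "7", "8", "9"]
--     result_numbers: list[str] = []
--     for char in line:
--         if char in digits:
--             result_numbers.append(char)
--     if result_numbers:
--         return int(result_numbers[0] + result_numbers[-1])
--     else:
--         return 0
-- ===== SOURCE B (Python) =====
-- def naive_decomposition(line: str) -> int:
--     first = next((c for c in line if "0" <= c <= "9"), None)
--     if first is None:
--         return 0
--     last = next(c for c in reversed(line) if "0" <= c <= "9")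
--     return int(first + last)
-- ===== Notes on version B (the rewrite author's own statement) =====
-- stated objective: alternative
-- what changed: Instead of collecting every digit character of the line into a list and then indexing its two ends, B finds the first digit by a forward scan and the last digit by a scan over the reversed string, keeping no intermediate list.
import Mathlib
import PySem

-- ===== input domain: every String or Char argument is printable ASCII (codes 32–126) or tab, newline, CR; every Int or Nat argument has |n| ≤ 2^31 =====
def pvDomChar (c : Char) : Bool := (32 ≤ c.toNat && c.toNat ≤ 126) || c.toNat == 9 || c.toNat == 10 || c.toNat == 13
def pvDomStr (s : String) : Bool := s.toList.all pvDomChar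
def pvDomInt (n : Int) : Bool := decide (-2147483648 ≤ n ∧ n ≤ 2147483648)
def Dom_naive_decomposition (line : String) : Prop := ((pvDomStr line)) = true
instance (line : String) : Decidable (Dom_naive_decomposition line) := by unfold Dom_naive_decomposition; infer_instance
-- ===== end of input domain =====

-- B replaces A's "collect every digit into a list, then take its ends" by two find-first
-- scans (left-to-right for the first digit, over the reversed string for the last); same
-- return value, no intermediate list (objective: alternative decomposition).

-- ===== PORT A =====
def naive_decomposition (line : String) : Int :=
  let digits : List Char := ['0', '1', '2', '3', '4', '5', '6', '7', '8', '9']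
  let result_numbers : List Char :=
    line.toList.foldl (fun acc c => if digits.contains c then acc ++ [c] else acc) []
  match result_numbers with
  | [] => 0
  | _ :: _ =>
    -- int(result_numbers[0] + result_numbers[-1]); both indexings are in range here,
    -- and int() of two digit characters always succeeds, so the getD 0 defaults are never taken
    match PySem.List.pyGet? result_numbers 0, PySem.List.pyGet? result_numbers (-1) with
    | some f, some l => (PySem.Int.ofChars? [f, l]).getD 0
    | _, _ => 0

-- ===== PORT B =====
def naive_decomposition_alt (line : String) : Int :=
  match line.toList.find? (fun c => '0' ≤ c && c ≤ '9') with
  | none => 0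
  | some f =>
    match line.toList.reverse.find? (fun c => '0' ≤ c && c ≤ '9') with
    -- int(first + last); always succeeds on two digit characters, the getD 0 default is never taken
    | some l => (PySem.Int.ofChars? [f, l]).getD 0
    | none => 0

-- ===== PRECONDITION & SPEC =====
def Spec_naive_decomposition (line : String) (out : Int) : Prop := out = naive_decomposition_alt line
instance (line : String) (out : Int) : Decidable (Spec_naive_decomposition line out) := by unfold Spec_naive_decomposition; infer_instance

-- ===== CLAIM (what is proved, stated in full; the proofs are below) =====
def Claim_equal_naive_decomposition : Prop := ∀ (line : String), Dom_naive_decomposition line → Spec_naive_decomposition line (naive_decomposition line)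

-- ===== LEMMAS AND PROOFS =====

-- A's membership test in the literal digit list agrees with B's range test.
theorem dig_eq (c : Char) :
    (['0', '1', '2', '3', '4', '5', '6', '7', '8', '9'].contains c) = ('0' ≤ c && c ≤ '9') := by
  rw [Bool.eq_iff_iff]
  simp only [List.contains_eq_mem, List.mem_cons, List.not_mem_nil, or_false,
    decide_eq_true_eq, Bool.and_eq_true, Char.le_def, UInt32.le_iff_toNat_le,
    Char.ext_iff, ← UInt32.toNat_inj,
    show ('0').val.toNat = 48 from rfl, show ('1').val.toNat = 49 from rfl,
    show ('2').val.toNat = 50 from rfl, show ('3').val.toNat = 51 from rfl,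
    show ('4').val.toNat = 52 from rfl, show ('5').val.toNat = 53 from rfl,
    show ('6').val.toNat = 54 from rfl, show ('7').val.toNat = 55 from rfl,
    show ('8').val.toNat = 56 from rfl, show ('9').val.toNat = 57 from rfl]
  omega

-- A's accumulating loop is exactly the filter of B's digit test.
theorem fold_eq_filter (l : List Char) :
    l.foldl (fun acc c =>
        if (['0', '1', '2', '3', '4', '5', '6', '7', '8', '9'] : List Char).contains c
        then acc ++ [c] else acc) [] =
      l.filter (fun c => '0' ≤ c && c ≤ '9') := by
  rw [PySem.List.foldl_append_if_eq_filter, List.nil_append]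
  exact List.filter_congr (fun x _ => dig_eq x)

-- ===== VERDICT (by name: the statement is the Claim_ definition above) =====
theorem naive_decomposition_spec : Claim_equal_naive_decomposition := by
  intro line _
  unfold Spec_naive_decomposition naive_decomposition naive_decomposition_alt
  simp only [fold_eq_filter]
  rw [show line.toList.find? (fun c => '0' ≤ c && c ≤ '9') =
        (line.toList.filter (fun c => '0' ≤ c && c ≤ '9')).head? from
      (List.head?_filter ..).symm,
    show line.toList.reverse.find? (fun c => '0' ≤ c && c ≤ '9') =
        (line.toList.filter (fun c => '0' ≤ c && c ≤ '9')).getLast? from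
      (List.getLast?_filter ..).symm]
  cases h : line.toList.filter (fun c => '0' ≤ c && c ≤ '9') with
  | nil => simp
  | cons a t =>
    obtain ⟨x, hx⟩ : ∃ x, (a :: t).getLast? = some x :=
      ⟨(a :: t).getLast (List.cons_ne_nil a t), List.getLast?_eq_some_getLast ..⟩
    simp [PySem.List.pyGet?_neg_one, hx]
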